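-- pv_equiv track=rewrite | github.com/tzwx/DeepLearning | LSTM_Cycle/dataset/DataLoader.py | data_adjustment
-- ===== SOURCE A (Python) =====
-- def data_adjustment(keypoint):
--     length = len(keypoint)
--     keypoint_correct = [ []for i in range(length) ]
--     temp = []
--     for i in range(length): #photo
--         if(len(keypoint[i])) == 1:
--             temp = []
--             keypoint_correct[i].append(temp)
--         else:
--             cell_length = len(keypoint[i])
--             for j in range(cell_length): #people
--                 temp1 = [ []for i in range(cell_length) ]
--                 for k in range(15):
--                     if k == 0:
--                         temp1[j].append(keypoint[i][j][0:3])
--                     else: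
--                         temp1[j].append(keypoint[i][j][k*3:k*3+3])
--                 keypoint_correct[i].append(temp1[j])
--
--     return keypoint_correct
-- ===== SOURCE B (Python) =====
-- def data_adjustment(keypoint):
--     result = []
--     for photo in keypoint:
--         if len(photo) == 1:
--             result.append([[]])
--             continue
--         people = []
--         for person in photo:
--             triples = []
--             rest = person
--             while rest and len(triples) < 15:
--                 triples.append(rest[:3])
--                 rest = rest[3:]
--             triples.extend([] for _ in range(15 - len(triples)))
--             people.append(triples)
--         result.append(people)
--     return result
-- ===== Notes on version B (the rewrite author's own statement) =====
-- stated objective: alternative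
-- what changed: A builds a fresh length-people scratch list per person and fills 15 indexed slices keypoint[i][j][k*3:k*3+3] into it; B never indexes: it consumes each person's flat list three elements at a time with a chunking while-loop (rest[:3]/rest[3:]) and pads the chunk list with empty lists up to 15.
import Mathlib
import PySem

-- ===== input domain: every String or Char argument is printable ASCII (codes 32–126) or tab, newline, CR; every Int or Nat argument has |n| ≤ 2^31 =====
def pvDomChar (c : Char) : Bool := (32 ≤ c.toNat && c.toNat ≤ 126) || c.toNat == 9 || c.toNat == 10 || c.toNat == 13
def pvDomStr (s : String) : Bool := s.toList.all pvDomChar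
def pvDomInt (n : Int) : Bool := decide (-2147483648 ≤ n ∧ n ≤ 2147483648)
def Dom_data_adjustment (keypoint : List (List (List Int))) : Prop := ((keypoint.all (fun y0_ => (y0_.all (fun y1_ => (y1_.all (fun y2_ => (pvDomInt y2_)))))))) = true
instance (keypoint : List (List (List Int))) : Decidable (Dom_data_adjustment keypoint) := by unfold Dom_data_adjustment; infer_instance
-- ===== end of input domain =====

-- B replaces A's indexed slicing with per-person scratch-list bookkeeping by consuming each
-- person's flat list three elements at a time (a chunking while-loop) and padding to 15 triples.

-- ===== PORT A =====
-- literal transliteration of A: pre-built list of empty rows, outer photo loop mutating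
-- keypoint_correct[i], per-person scratch list temp1 mutated at index j, then temp1[j] appended.
def data_adjustment (keypoint : List (List (List Int))) : List (List (List (List Int))) :=
  (List.range keypoint.length).foldl (fun kc i =>
    if (keypoint.getD i []).length == 1 then
      kc.set i (kc.getD i [] ++ [[]])
    else
      let cell_length := (keypoint.getD i []).length
      (List.range cell_length).foldl (fun kc j =>
        let temp1 : List (List (List Int)) := (List.range cell_length).map (fun _ => [])
        let temp1 := (List.range 15).foldl (fun t1 (k : Nat) =>
          if k == 0 then
            t1.set j (t1.getD j [] ++ [PySem.List.slice ((keypoint.getD i []).getD j []) (some 0) (some 3)])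
          else
            t1.set j (t1.getD j [] ++ [PySem.List.slice ((keypoint.getD i []).getD j []) (some ((k : Int) * 3)) (some ((k : Int) * 3 + 3))])) temp1
        kc.set i (kc.getD i [] ++ [temp1.getD j []])) kc)
    ((List.range keypoint.length).map (fun _ => []))

-- ===== PORT B =====
-- transliteration of Source B's while loop: while rest and len(triples) < 15, pop the first
-- three elements (rest[:3] / rest[3:] as PySem slices) onto triples.
def pvWhileChunk (triples : List (List Int)) (rest : List Int) : List (List Int) :=
  if _h : rest ≠ [] ∧ triples.length < 15 then
    pvWhileChunk (triples ++ [PySem.List.slice rest none (some 3)])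
      (PySem.List.slice rest (some 3) none)
  else triples
termination_by 15 - triples.length
decreasing_by simp; omega

-- literal transliteration of B: explicit result/people accumulators, chunking loop, pad with
-- (15 - len) empty lists.
def data_adjustment_alt (keypoint : List (List (List Int))) : List (List (List (List Int))) :=
  keypoint.foldl (fun result photo =>
    if photo.length == 1 then result ++ [[[]]]
    else
      let people := photo.foldl (fun people person =>
        let triples := pvWhileChunk [] person
        let triples := triples ++ List.replicate (15 - triples.length) []
        people ++ [triples]) []
      result ++ [people]) []

-- ===== PRECONDITION & SPEC =====
def Spec_data_adjustment (keypoint : List (List (List Int))) (out : List (List (List (List Int)))) : Prop := out = data_adjustment_alt keypoint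
instance (keypoint : List (List (List Int))) (out : List (List (List (List Int)))) : Decidable (Spec_data_adjustment keypoint out) := by unfold Spec_data_adjustment; infer_instance

-- ===== CLAIM (what is proved, stated in full; the proofs are below) =====
def Claim_equal_data_adjustment : Prop := ∀ (keypoint : List (List (List Int))), Dom_data_adjustment keypoint → Spec_data_adjustment keypoint (data_adjustment keypoint)

-- ===== LEMMAS AND PROOFS =====

-- the common per-photo value both programs compute (proof helper only)
def pvPhoto (photo : List (List Int)) : List (List (List Int)) :=
  if photo.length == 1 then [[]]
  else photo.map (fun person =>
    (List.range 15).map (fun (k : Nat) =>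
      PySem.List.slice person (some (3 * (k : Int))) (some (3 * (k : Int) + 3))))

-- non-accumulator form of B's chunking loop
def pvChunkF : Nat → List Int → List (List Int)
  | 0, _ => []
  | _+1, [] => []
  | f+1, xs => xs.take 3 :: pvChunkF f (xs.drop 3)

theorem pv_getD_set_self {α : Type} (xs : List α) (j : Nat) (v d : α) (h : j < xs.length) :
    (xs.set j v).getD j d = v := by
  simp [List.getD, h]

theorem pv_getD_set_ne {α : Type} (xs : List α) (j t : Nat) (v d : α) (h : j ≠ t) :
    (xs.set j v).getD t d = xs.getD t d := by
  simp [List.getD, h]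

-- Both of A's mutate-one-slot loops have this shape: fold over range n appending f k to entry j.
theorem pv_foldl_set_append {α : Type} (f : Nat → α) (j : Nat) :
    ∀ (n : Nat) (t : List (List α)),
      (List.range n).foldl (fun t1 k => t1.set j (t1.getD j [] ++ [f k])) t
        = t.set j (t.getD j [] ++ (List.range n).map f) := by
  intro n
  induction n with
  | zero =>
    intro t
    simp only [List.range_zero, List.foldl_nil, List.map_nil, List.append_nil]
    by_cases h : j < t.length
    · rw [List.getD_eq_getElem _ _ h, List.set_getElem_self]
    · rw [List.set_eq_of_length_le (Nat.le_of_not_lt h)]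
  | succ n ih =>
    intro t
    rw [List.range_succ, List.foldl_append, List.map_append, ih]
    by_cases h : j < t.length
    · simp [h, List.set_set]
    · simp only [List.foldl_cons, List.foldl_nil]
      rw [List.set_eq_of_length_le (Nat.le_of_not_lt h),
        List.set_eq_of_length_le (Nat.le_of_not_lt h),
        List.set_eq_of_length_le (Nat.le_of_not_lt h)]

theorem pv_take_set {α : Type} (xs : List α) (s : Nat) (v : α) (h : s < xs.length) :
    (xs.set s v).take (s+1) = xs.take s ++ [v] := by
  rw [List.set_eq_take_append_cons_drop, if_pos h, List.take_append]
  simp [List.length_take, Nat.min_eq_left (Nat.le_of_lt h)]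

theorem pv_map_range_getD {α β : Type} (row : List α) (f : α → β) (d : α) :
    (List.range row.length).map (fun j => f (row.getD j d)) = row.map f := by
  apply List.ext_getElem <;> simp
  intro i h _; rw [List.getElem?_eq_getElem h]; rfl

-- A's body at photo index i equals setting slot i to pvPhoto of that row, whenever slot i is empty.
theorem pv_step_eq (keypoint : List (List (List Int))) (kc : List (List (List (List Int)))) (i : Nat)
    (hkc : kc.getD i [] = []) :
    (if (keypoint.getD i []).length == 1 then
      kc.set i (kc.getD i [] ++ [[]])
    else
      let cell_length := (keypoint.getD i []).length
      (List.range cell_length).foldl (fun kc j =>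
        let temp1 : List (List (List Int)) := (List.range cell_length).map (fun _ => [])
        let temp1 := (List.range 15).foldl (fun t1 (k : Nat) =>
          if k == 0 then
            t1.set j (t1.getD j [] ++ [PySem.List.slice ((keypoint.getD i []).getD j []) (some 0) (some 3)])
          else
            t1.set j (t1.getD j [] ++ [PySem.List.slice ((keypoint.getD i []).getD j []) (some ((k : Int) * 3)) (some ((k : Int) * 3 + 3))])) temp1
        kc.set i (kc.getD i [] ++ [temp1.getD j []])) kc)
    = kc.set i (pvPhoto (keypoint.getD i [])) := by
  set row := keypoint.getD i [] with hrow
  by_cases h1 : row.length == 1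
  · simp only [h1, if_pos, hkc, List.nil_append, pvPhoto]
  · simp only [h1, pvPhoto, Bool.false_eq_true, if_false]
    have hinner : ∀ j : Nat,
        ((List.range 15).foldl (fun t1 (k : Nat) =>
          if k == 0 then
            t1.set j (t1.getD j [] ++ [PySem.List.slice (row.getD j []) (some 0) (some 3)])
          else
            t1.set j (t1.getD j [] ++ [PySem.List.slice (row.getD j []) (some ((k : Int) * 3)) (some ((k : Int) * 3 + 3))]))
          ((List.range row.length).map (fun _ => ([] : List (List Int)))))
        = ((List.range row.length).map (fun _ => ([] : List (List Int)))).set j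
            ((((List.range row.length).map (fun _ => ([] : List (List Int)))).getD j []) ++
              (List.range 15).map (fun (k : Nat) => PySem.List.slice (row.getD j []) (some (3 * (k : Int))) (some (3 * (k : Int) + 3)))) := by
      intro j
      rw [← pv_foldl_set_append
        (fun (k : Nat) => PySem.List.slice (row.getD j []) (some (3 * (k : Int))) (some (3 * (k : Int) + 3))) j 15
        ((List.range row.length).map (fun _ => ([] : List (List Int))))]
      apply PySem.List.foldl_congr_mem
      intro t1 k _
      by_cases hk : k = 0
      · subst hk; norm_num
      · have hk' : (k == 0) = false := by simp [hk]
        simp only [hk', Bool.false_eq_true, if_false]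
        ring_nf
    have hperson := pv_foldl_set_append
      (fun j => (((List.range row.length).map (fun _ => ([] : List (List Int)))).set j
            ((((List.range row.length).map (fun _ => ([] : List (List Int)))).getD j []) ++
              (List.range 15).map (fun (k : Nat) => PySem.List.slice (row.getD j []) (some (3 * (k : Int))) (some (3 * (k : Int) + 3))))).getD j [])
      i row.length kc
    calc (List.range row.length).foldl (fun kc j =>
        let temp1 : List (List (List Int)) := (List.range row.length).map (fun _ => [])
        let temp1 := (List.range 15).foldl (fun t1 (k : Nat) =>
          if k == 0 then
            t1.set j (t1.getD j [] ++ [PySem.List.slice (row.getD j []) (some 0) (some 3)])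
          else
            t1.set j (t1.getD j [] ++ [PySem.List.slice (row.getD j []) (some ((k : Int) * 3)) (some ((k : Int) * 3 + 3))])) temp1
        kc.set i (kc.getD i [] ++ [temp1.getD j []])) kc
        = kc.set i (kc.getD i [] ++ (List.range row.length).map
            (fun j => (((List.range row.length).map (fun _ => ([] : List (List Int)))).set j
            ((((List.range row.length).map (fun _ => ([] : List (List Int)))).getD j []) ++
              (List.range 15).map (fun (k : Nat) => PySem.List.slice (row.getD j []) (some (3 * (k : Int))) (some (3 * (k : Int) + 3))))).getD j [])) := by
          rw [← hperson]
          apply PySem.List.foldl_congr_mem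
          intro kc' j _
          simp only [hinner j]
      _ = kc.set i (row.map (fun person =>
            (List.range 15).map (fun (k : Nat) =>
              PySem.List.slice person (some (3 * (k : Int))) (some (3 * (k : Int) + 3))))) := by
          rw [hkc, List.nil_append]
          congr 1
          rw [← pv_map_range_getD row (fun person => (List.range 15).map (fun (k : Nat) =>
            PySem.List.slice person (some (3 * (k : Int))) (some (3 * (k : Int) + 3)))) []]
          apply List.map_congr_left
          intro j hj
          rw [List.mem_range] at hj
          rw [pv_getD_set_self]
          · simp [List.getD, hj]
          · simpa using hj

-- A's main loop invariant: processed prefix is the mapped result, untouched suffix stays empty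
theorem pv_outer (keypoint : List (List (List Int))) :
    ∀ (n s : Nat) (kc : List (List (List (List Int)))),
      kc.length = s + n → (∀ t, s ≤ t → kc.getD t [] = []) →
      (List.range' s n).foldl (fun kc i =>
        if (keypoint.getD i []).length == 1 then
          kc.set i (kc.getD i [] ++ [[]])
        else
          let cell_length := (keypoint.getD i []).length
          (List.range cell_length).foldl (fun kc j =>
            let temp1 : List (List (List Int)) := (List.range cell_length).map (fun _ => [])
            let temp1 := (List.range 15).foldl (fun t1 (k : Nat) =>
              if k == 0 then
                t1.set j (t1.getD j [] ++ [PySem.List.slice ((keypoint.getD i []).getD j []) (some 0) (some 3)])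
              else
                t1.set j (t1.getD j [] ++ [PySem.List.slice ((keypoint.getD i []).getD j []) (some ((k : Int) * 3)) (some ((k : Int) * 3 + 3))])) temp1
            kc.set i (kc.getD i [] ++ [temp1.getD j []])) kc) kc
      = kc.take s ++ (List.range' s n).map (fun i => pvPhoto (keypoint.getD i [])) := by
  intro n
  induction n with
  | zero =>
    intro s kc hlen _
    simp [List.take_of_length_le (by omega : kc.length ≤ s)]
  | succ n ih =>
    intro s kc hlen hempty
    rw [List.range'_succ, List.foldl_cons, List.map_cons]
    rw [pv_step_eq keypoint kc s (hempty s (Nat.le_refl s))]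
    have hs : s < kc.length := by omega
    rw [ih (s+1) _ (by simp; omega)
      (fun t ht => by rw [pv_getD_set_ne _ _ _ _ _ (by omega)]; exact hempty t (by omega))]
    rw [pv_take_set _ _ _ hs]
    simp

-- A as a map of pvPhoto over the photos
theorem pv_A_eq_map (keypoint : List (List (List Int))) :
    data_adjustment keypoint = keypoint.map pvPhoto := by
  unfold data_adjustment
  rw [show List.range keypoint.length = List.range' 0 keypoint.length from List.range_eq_range']
  rw [pv_outer keypoint keypoint.length 0 _ (by simp) (fun t _ => by
    by_cases h : t < keypoint.length
    · simp [List.getD, h]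
    · simp [List.getD, Nat.le_of_not_lt h])]
  rw [← show List.range keypoint.length = List.range' 0 keypoint.length from List.range_eq_range', List.take_zero, List.nil_append]
  exact pv_map_range_getD keypoint pvPhoto []

-- B's while loop in non-accumulator form
theorem pv_while_eq_chunkF :
    ∀ (f : Nat) (triples : List (List Int)) (rest : List Int), 15 - triples.length = f →
      pvWhileChunk triples rest = triples ++ pvChunkF f rest := by
  intro f
  induction f with
  | zero =>
    intro triples rest hf
    rw [pvWhileChunk]
    have : ¬ (rest ≠ [] ∧ triples.length < 15) := by
      rintro ⟨-, h⟩; omega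
    simp [this, pvChunkF]
  | succ f ih =>
    intro triples rest hf
    rw [pvWhileChunk]
    by_cases hr : rest = []
    · subst hr; simp [pvChunkF]
    · have hlt : triples.length < 15 := by omega
      rw [dif_pos ⟨hr, hlt⟩]
      rw [PySem.List.slice_to (hb := by norm_num), PySem.List.slice_from (ha := by norm_num)]
      rw [ih _ _ (by simp; omega)]
      cases rest with
      | nil => exact absurd rfl hr
      | cons x xs => simp [pvChunkF]

-- padded chunking is exactly the 15 indexed drop/take triples
theorem pv_chunkF_pad :
    ∀ (n : Nat) (xs : List Int),
      pvChunkF n xs ++ List.replicate (n - (pvChunkF n xs).length) []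
        = (List.range n).map (fun k => (xs.drop (3 * k)).take 3) := by
  intro n
  induction n with
  | zero => intro xs; simp [pvChunkF]
  | succ n ih =>
    intro xs
    cases xs with
    | nil =>
      simp only [pvChunkF, List.nil_append, List.length_nil, Nat.sub_zero,
        List.drop_nil, List.take_nil]
      rw [List.map_const', List.length_range]
    | cons x xs' =>
      simp only [pvChunkF, List.length_cons, List.cons_append, Nat.succ_sub_succ]
      rw [ih (List.drop 3 (x :: xs')), List.range_succ_eq_map, List.map_cons, List.map_map]
      refine congrArg₂ List.cons (by simp) ?_
      apply List.map_congr_left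
      intro a _
      simp only [Function.comp_apply]
      rw [List.drop_drop]
      congr 2
      omega

-- B's per-person value equals pvPhoto's slice form
theorem pv_person_eq (person : List Int) :
    pvWhileChunk [] person ++ List.replicate (15 - (pvWhileChunk [] person).length) []
      = (List.range 15).map (fun (k : Nat) =>
          PySem.List.slice person (some (3 * (k : Int))) (some (3 * (k : Int) + 3))) := by
  rw [pv_while_eq_chunkF 15 [] person (by simp), List.nil_append, pv_chunkF_pad]
  apply List.map_congr_left
  intro k _
  have h1 : (3 * (k : Int)) = ((3 * k : Nat) : Int) := by push_cast; ring
  have h2 : (3 * (k : Int) + 3) = ((3 * k + 3 : Nat) : Int) := by push_cast; ring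
  rw [h2, h1, PySem.List.slice_natCast]
  congr 1
  omega

-- foldl that appends one image per element is a map
theorem pv_foldl_append_map {α β : Type} (f : α → β) :
    ∀ (xs : List α) (acc : List β),
      xs.foldl (fun acc x => acc ++ [f x]) acc = acc ++ xs.map f := by
  intro xs
  induction xs with
  | nil => intro acc; simp
  | cons x xs ih => intro acc; simp [ih]

-- B as a map of pvPhoto over the photos
theorem pv_B_eq_map (keypoint : List (List (List Int))) :
    data_adjustment_alt keypoint = keypoint.map pvPhoto := by
  unfold data_adjustment_alt
  have hfun : (fun (result : List (List (List (List Int)))) (photo : List (List Int)) =>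
      if photo.length == 1 then result ++ [[[]]]
      else
        let people := photo.foldl (fun people person =>
          let triples := pvWhileChunk [] person
          let triples := triples ++ List.replicate (15 - triples.length) []
          people ++ [triples]) []
        result ++ [people])
      = (fun result photo => result ++ [pvPhoto photo]) := by
    funext result photo
    by_cases h1 : photo.length == 1
    · simp only [h1, if_pos, pvPhoto]
    · simp only [h1, Bool.false_eq_true, if_false, pvPhoto]
      show result ++ [photo.foldl (fun people person =>
          people ++ [pvWhileChunk [] person ++ List.replicate (15 - (pvWhileChunk [] person).length) []]) []]
        = _
      rw [pv_foldl_append_map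
        (fun person => pvWhileChunk [] person ++ List.replicate (15 - (pvWhileChunk [] person).length) [])
        photo [], List.nil_append]
      congr 1
      rw [List.map_congr_left (fun person _ => pv_person_eq person)]
  rw [hfun, pv_foldl_append_map pvPhoto keypoint [], List.nil_append]

-- ===== VERDICT (by name: the statement is the Claim_ definition above) =====
theorem data_adjustment_spec : Claim_equal_data_adjustment := by
  intro keypoint _
  unfold Spec_data_adjustment
  rw [pv_A_eq_map, pv_B_eq_map]
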